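-- pv_equiv track=rewrite | github.com/Adrianmc94/REPASO_RECU_PROG | 1PROG_PY/BOLETINES/BOLETIN7/EJERCICIO13.py | substituir_digitos
-- ===== SOURCE A (Python) =====
-- def substituir_digitos(cadea: str, caracter: str, max_operacions: int = -1) -> str:
--     nova_cadea = ""
--     contador = 0
--     for letra in cadea:
--         if letra.isdigit():
--             if max_operacions <= 0 or contador < max_operacions:
--                 nova_cadea += caracter
--                 contador += 1
--             else:
--                 nova_cadea += letra
--         else:
--             nova_cadea += letra
--     return nova_cadea
-- ===== SOURCE B (Python) =====
-- def substituir_digitos(cadea: str, caracter: str, max_operacions: int = -1) -> str: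
--     positions = [i for i, ch in enumerate(cadea) if ch.isdigit()]
--     if max_operacions > 0:
--         positions = positions[:max_operacions]
--     return "".join(caracter if i in positions else ch for i, ch in enumerate(cadea))
-- ===== Notes on version B (the rewrite author's own statement) =====
-- stated objective: alternative
-- what changed: Replaces the single counter-threaded accumulation pass with an index-table decomposition: first collect the digit positions, truncate that list to max_operacions when positive, then rebuild the string by substituting exactly at the selected positions.
import Mathlib
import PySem

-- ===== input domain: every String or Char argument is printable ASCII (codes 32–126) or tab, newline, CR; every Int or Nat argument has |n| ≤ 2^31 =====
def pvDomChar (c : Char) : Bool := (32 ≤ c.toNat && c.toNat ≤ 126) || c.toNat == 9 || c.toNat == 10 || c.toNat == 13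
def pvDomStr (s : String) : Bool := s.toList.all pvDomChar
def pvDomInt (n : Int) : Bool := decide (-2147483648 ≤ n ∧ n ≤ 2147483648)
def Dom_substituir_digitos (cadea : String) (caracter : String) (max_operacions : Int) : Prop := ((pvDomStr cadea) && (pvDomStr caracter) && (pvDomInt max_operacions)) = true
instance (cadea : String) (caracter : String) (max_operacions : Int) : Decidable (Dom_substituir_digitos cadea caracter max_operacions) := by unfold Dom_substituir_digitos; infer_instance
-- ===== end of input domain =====

-- B replaces A's counter-threaded single accumulation pass by an index-table decomposition
-- (collect digit positions, truncate to max_operacions when positive, substitute at those positions);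
-- same return value, alternative structure.

-- ===== PORT A =====
def substituir_digitos (cadea : String) (caracter : String) (max_operacions : Int) : String :=
  String.mk
    (cadea.toList.foldl
      (fun (st : List Char × Int) letra =>
        if PySem.Chars.isdigit letra then
          if max_operacions ≤ 0 ∨ st.2 < max_operacions then
            (st.1 ++ caracter.toList, st.2 + 1)
          else (st.1 ++ [letra], st.2)
        else (st.1 ++ [letra], st.2))
      ([], 0)).1

-- ===== PORT B =====
def substituir_digitos_alt (cadea : String) (caracter : String) (max_operacions : Int) : String :=
  let positions := (PySem.List.enumerate cadea.toList 0).filterMap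
    (fun p => if PySem.Chars.isdigit p.2 then some p.1 else none)
  let positions := if max_operacions > 0 then
      PySem.List.slice positions none (some max_operacions)
    else positions
  String.mk (PySem.Chars.join []
    ((PySem.List.enumerate cadea.toList 0).map
      (fun p => if positions.contains p.1 then caracter.toList else [p.2])))

-- ===== PRECONDITION & SPEC =====
def Spec_substituir_digitos (cadea : String) (caracter : String) (max_operacions : Int) (out : String) : Prop := out = substituir_digitos_alt cadea caracter max_operacions
instance (cadea : String) (caracter : String) (max_operacions : Int) (out : String) : Decidable (Spec_substituir_digitos cadea caracter max_operacions out) := by unfold Spec_substituir_digitos; infer_instance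

-- ===== CLAIM (what is proved, stated in full; the proofs are below) =====
def Claim_equal_substituir_digitos : Prop := ∀ (cadea : String) (caracter : String) (max_operacions : Int), Dom_substituir_digitos cadea caracter max_operacions → Spec_substituir_digitos cadea caracter max_operacions (substituir_digitos cadea caracter max_operacions)

-- ===== LEMMAS AND PROOFS =====

-- Reference replacement function: replace the digit at a position iff m ≤ 0 or the
-- number of digits strictly before it (plus the offset c) is below m.
def pvRepl (car : List Char) (m : Int) : List Char → Int → List Char
  | [], _ => []
  | ch :: t, c =>
    (if PySem.Chars.isdigit ch then (if m ≤ 0 ∨ c < m then car else [ch]) else [ch]) ++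
      pvRepl car m t (c + if PySem.Chars.isdigit ch then 1 else 0)

-- The digit-position list of B, with a general enumeration start (for the induction).
def pvPos (cs : List Char) (s : Int) : List Int :=
  (PySem.List.enumerate cs s).filterMap (fun p => if PySem.Chars.isdigit p.2 then some p.1 else none)

theorem pvPos_cons (ch : Char) (t : List Char) (s : Int) :
    pvPos (ch :: t) s = (if PySem.Chars.isdigit ch then [s] else []) ++ pvPos t (s + 1) := by
  by_cases hd : PySem.Chars.isdigit ch <;>
    simp [pvPos, PySem.List.enumerate_cons, List.filterMap_cons, hd]

theorem pvPos_ge (cs : List Char) : ∀ (s : Int), ∀ j ∈ pvPos cs s, s ≤ j := by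
  induction cs with
  | nil => intro s j hj; simp [pvPos] at hj
  | cons ch t ih =>
    intro s j hj
    rw [pvPos_cons] at hj
    rcases List.mem_append.1 hj with h | h
    · split at h <;> simp_all
    · have := ih (s + 1) j h; omega

theorem pvPos_contains_take (cs : List Char) :
    ∀ (s : Int) (k : Nat) (_ : k < cs.length) (t : Nat),
      ((pvPos cs s).take t).contains (s + (k : Int)) =
        (PySem.Chars.isdigit cs[k]! && decide ((cs.take k).countP PySem.Chars.isdigit < t)) := by
  induction cs with
  | nil => intro _ _ hk _; simp at hk
  | cons ch rest ih =>
    intro s k hk t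
    rw [pvPos_cons]
    by_cases hd : PySem.Chars.isdigit ch
    · rw [if_pos hd, List.singleton_append]
      cases k with
      | zero =>
        cases t with
        | zero => simp
        | succ t' => simp [hd]
      | succ k' =>
        have hk' : k' < rest.length := by simpa using hk
        cases t with
        | zero => simp
        | succ t' =>
          rw [List.take_succ_cons, List.contains_cons]
          have hne : (s + ((k' + 1 : Nat) : Int) == s) = false := by
            simp only [beq_eq_false_iff_ne]
            push_cast
            omega
          rw [hne, Bool.false_or]
          have harg : s + ((k' + 1 : Nat) : Int) = (s + 1) + (k' : Int) := by push_cast; ring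
          rw [harg, ih (s + 1) k' hk' t']
          simp only [List.getElem!_cons_succ, List.take_succ_cons, List.countP_cons, hd]
          congr 1
          rw [decide_eq_decide]
          simp only [if_pos]
          omega
    · have hdf : PySem.Chars.isdigit ch = false := by simpa using hd
      rw [if_neg hd, List.nil_append]
      cases k with
      | zero =>
        simp only [Nat.cast_zero, add_zero, List.getElem!_cons_zero, hdf, Bool.false_and]
        rw [List.contains_eq_any_beq]
        simp only [List.any_eq_false, beq_iff_eq]
        intro j hj
        have := pvPos_ge rest (s + 1) j (List.mem_of_mem_take hj)
        omega
      | succ k' =>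
        have hk' : k' < rest.length := by simpa using hk
        have harg : s + ((k' + 1 : Nat) : Int) = (s + 1) + (k' : Int) := by push_cast; ring
        rw [harg, ih (s + 1) k' hk' t]
        simp only [List.getElem!_cons_succ, List.take_succ_cons, List.countP_cons, hdf]
        simp

theorem pvPos_length (cs : List Char) : ∀ s, (pvPos cs s).length = cs.countP PySem.Chars.isdigit := by
  induction cs with
  | nil => intro s; simp [pvPos]
  | cons ch t ih =>
    intro s
    rw [pvPos_cons, List.length_append, ih (s + 1), List.countP_cons]
    split <;> simp <;> omega

theorem pvPos_contains (cs : List Char) (s : Int) (k : Nat) (hk : k < cs.length) :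
    (pvPos cs s).contains (s + (k : Int)) = PySem.Chars.isdigit cs[k]! := by
  have h := pvPos_contains_take cs s k hk (pvPos cs s).length
  rw [List.take_length] at h
  rw [h, pvPos_length]
  have hgl : cs[k]! = cs[k] := by
    rw [List.getElem!_eq_getElem?_getD, List.getElem?_eq_getElem hk]
    rfl
  by_cases hd : PySem.Chars.isdigit cs[k] = true
  · have hdrop : cs.take (k + 1) = cs.take k ++ [cs[k]] := by
      rw [List.take_add_one, List.getElem?_eq_getElem hk]
      rfl
    have hcount : (cs.take k).countP PySem.Chars.isdigit < cs.countP PySem.Chars.isdigit := by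
      have h1 : (cs.take (k + 1)).countP PySem.Chars.isdigit
          = (cs.take k).countP PySem.Chars.isdigit + 1 := by
        rw [hdrop, List.countP_append]
        simp [hd]
      have h2 : (cs.take (k + 1)).countP PySem.Chars.isdigit ≤ cs.countP PySem.Chars.isdigit := by
        conv_rhs => rw [← List.take_append_drop (k + 1) cs]
        rw [List.countP_append]
        omega
      omega
    simp [hgl, hd, hcount]
  · have hdf : PySem.Chars.isdigit cs[k] = false := by simpa using hd
    simp [hgl, hdf]

-- A's fold, started at any accumulator and any pair of counters that agree on "still below m".
theorem pvFoldA (car : List Char) (m : Int) :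
    ∀ (cs : List Char) (acc : List Char) (c c' : Int),
      (m ≤ 0 ∨ c = c' ∨ (m ≤ c ∧ m ≤ c')) →
      (cs.foldl
        (fun (st : List Char × Int) letra =>
          if PySem.Chars.isdigit letra then
            if m ≤ 0 ∨ st.2 < m then (st.1 ++ car, st.2 + 1)
            else (st.1 ++ [letra], st.2)
          else (st.1 ++ [letra], st.2)) (acc, c)).1 = acc ++ pvRepl car m cs c' := by
  intro cs
  induction cs with
  | nil => intro acc c c' _; simp [pvRepl]
  | cons ch t ih =>
    intro acc c c' hcc
    simp only [List.foldl_cons, pvRepl]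
    by_cases hd : PySem.Chars.isdigit ch
    · simp only [hd, if_pos]
      by_cases hlt : m ≤ 0 ∨ c < m
      · have hlt' : m ≤ 0 ∨ c' < m := by omega
        simp only [hlt, if_pos, hlt', if_pos]
        rw [ih (acc ++ car) (c + 1) (c' + 1) (by omega), List.append_assoc]
      · have hlt' : ¬ (m ≤ 0 ∨ c' < m) := by omega
        simp only [hlt, if_neg, hlt', if_neg, not_false_iff]
        rw [ih (acc ++ [ch]) c (c' + 1) (by omega), List.append_assoc]
    · have hdf : PySem.Chars.isdigit ch = false := by simpa using hd
      simp only [hdf, Bool.false_eq_true, if_false, add_zero]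
      rw [ih (acc ++ [ch]) c c' hcc, List.append_assoc]

theorem pvJoin_nil_cons (x : List Char) (xs : List (List Char)) :
    PySem.Chars.join [] (x :: xs) = x ++ PySem.Chars.join [] xs := by
  cases xs <;> simp [PySem.Chars.join, List.intercalate]

-- B's join-of-pieces over any selection set that selects exactly the digits whose
-- preceding-digit count (offset by c) is below m.
theorem pvJoinB (car : List Char) (m : Int) :
    ∀ (cs : List Char) (s c : Int) (sel : List Int),
      (∀ (k : Nat), k < cs.length →
        sel.contains (s + (k : Int)) =
          (PySem.Chars.isdigit cs[k]! &&
            decide (m ≤ 0 ∨ c + ((cs.take k).countP PySem.Chars.isdigit : Int) < m))) →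
      PySem.Chars.join []
        ((PySem.List.enumerate cs s).map
          (fun p => if sel.contains p.1 then car else [p.2])) = pvRepl car m cs c := by
  intro cs
  induction cs with
  | nil =>
    intro s c sel _
    simp [pvRepl, PySem.Chars.join, List.intercalate]
  | cons ch t ih =>
    intro s c sel hsel
    rw [PySem.List.enumerate_cons, List.map_cons, pvJoin_nil_cons, pvRepl]
    have h0 := hsel 0 (by simp)
    simp only [Nat.cast_zero, add_zero, List.getElem!_cons_zero, List.take_zero,
      List.countP_nil, Nat.cast_zero] at h0
    congr 1
    · rw [h0]
      by_cases hd : PySem.Chars.isdigit ch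
      · simp only [hd, Bool.true_and, if_pos]
        by_cases hc : m ≤ 0 ∨ c < m
        · have : m ≤ 0 ∨ c + 0 < m := by omega
          simp [this, hc]
        · have : ¬ (m ≤ 0 ∨ c + 0 < m) := by omega
          simp [this, hc]
      · simp [hd]
    · apply ih (s + 1) (c + if PySem.Chars.isdigit ch then 1 else 0) sel
      intro k hk
      have h1 := hsel (k + 1) (by simpa using hk)
      have harg : s + ((k : Nat) + 1 : Nat) = (s + 1) + (k : Int) := by push_cast; ring
      rw [harg] at h1
      rw [h1]
      simp only [List.getElem!_cons_succ, List.take_succ_cons, List.countP_cons]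
      congr 1
      rw [decide_eq_decide]
      by_cases hd : PySem.Chars.isdigit ch <;> simp [hd] <;> constructor <;> intro <;> omega

-- ===== VERDICT (by name: the statement is the Claim_ definition above) =====
theorem substituir_digitos_spec : Claim_equal_substituir_digitos := by
  intro cadea caracter m _
  unfold Spec_substituir_digitos substituir_digitos substituir_digitos_alt
  rw [pvFoldA caracter.toList m cadea.toList [] 0 0 (Or.inr (Or.inl rfl)), List.nil_append]
  have hpos : (PySem.List.enumerate cadea.toList 0).filterMap
      (fun p => if PySem.Chars.isdigit p.2 then some p.1 else none) = pvPos cadea.toList 0 := rfl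
  rw [hpos]
  set cs := cadea.toList with hcs
  by_cases hm : m > 0
  · simp only [hm, if_pos]
    rw [PySem.List.slice_to _ (by omega)]
    rw [pvJoinB caracter.toList m cs 0 0 _ ?_]
    intro k hk
    have h := pvPos_contains_take cs 0 k hk m.toNat
    simp only [zero_add] at h ⊢
    rw [h]
    congr 1
    rw [decide_eq_decide]
    constructor <;> intro <;> omega
  · simp only [hm, if_neg, not_false_iff]
    rw [pvJoinB caracter.toList m cs 0 0 _ ?_]
    intro k hk
    have h := pvPos_contains cs 0 k hk
    simp only [zero_add] at h ⊢
    rw [h]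
    have hdec : decide (m ≤ 0 ∨ ((cs.take k).countP PySem.Chars.isdigit : Int) < m) = true := by
      simp
      omega
    rw [hdec, Bool.and_true]
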